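-- pv_equiv track=rewrite | github.com/Ricky-Hu5918/Python-Lab | count_distinct_slices.py | count_distinct_slices
-- ===== SOURCE A (Python) =====
-- def count_distinct_slices(nums, m):
--     slices_counts = 0
--
--     ll = len(nums)
--     slices_counts += ll
--     for i in range(ll-1):
--         tmp_list = []
--         for j in range(i+1, ll):
--             tmp_list.append(nums[i])
--             if (nums[j] not in tmp_list):
--                 tmp_list.append(nums[j])
--                 slices_counts += 1
--             else:
--                 break
--
--     return slices_counts if slices_counts <= 10**9 else 10**9
-- ===== SOURCE B (Python) =====
-- def count_distinct_slices(nums, m):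
--     n = len(nums)
--     next_pos = {}
--     total = 0
--     run = 0
--     for i in range(n - 1, -1, -1):
--         run = min(run + 1, next_pos.get(nums[i], n) - i)
--         total += run
--         next_pos[nums[i]] = i
--     return total if total <= 10 ** 9 else 10 ** 9
-- ===== Notes on version B (the rewrite author's own statement) =====
-- stated objective: faster
-- what changed: Replaces the per-start rescan (for each i, grow a temp list and linearly test membership until a repeat) by a single right-to-left pass that maintains the longest-distinct-run length via the recurrence run = min(run+1, next_occurrence - i) using a last-seen-position dictionary, summing the runs.
import Mathlib
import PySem

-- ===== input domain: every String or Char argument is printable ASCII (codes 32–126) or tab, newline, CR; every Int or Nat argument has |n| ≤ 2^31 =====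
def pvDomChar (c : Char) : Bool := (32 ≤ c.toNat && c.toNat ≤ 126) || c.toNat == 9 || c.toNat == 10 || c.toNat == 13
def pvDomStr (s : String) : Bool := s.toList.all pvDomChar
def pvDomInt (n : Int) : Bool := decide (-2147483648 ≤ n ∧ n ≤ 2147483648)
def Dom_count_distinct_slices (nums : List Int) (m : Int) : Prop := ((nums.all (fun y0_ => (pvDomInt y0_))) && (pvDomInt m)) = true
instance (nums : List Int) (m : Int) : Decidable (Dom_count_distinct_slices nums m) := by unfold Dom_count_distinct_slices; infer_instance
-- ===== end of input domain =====

-- B replaces A's per-start rescan by one right-to-left pass keeping the longest-distinct-run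
-- length with a last-seen-position dictionary (faster in a timing run; same return value).

-- ===== PORT A =====
-- inner 'for j in range(i+1, ll)' loop of A, with its break ported as stopping the recursion
def innerA (nums : List Int) (i : Int) : List Int → List Int → Int → Int
  | [], _tmp, sc => sc
  | j :: rest, tmp, sc =>
    let tmp := tmp ++ [PySem.List.pyGetD nums i 0]
    if PySem.List.pyGetD nums j 0 ∉ tmp then
      innerA nums i rest (tmp ++ [PySem.List.pyGetD nums j 0]) (sc + 1)
    else sc

def count_distinct_slices (nums : List Int) (m : Int) : Int :=
  let ll : Int := PySem.List.len nums
  let sc : Int := 0 + ll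
  let sc := (PySem.List.pyRange 0 (ll - 1) 1).foldl
    (fun sc i => innerA nums i (PySem.List.pyRange (i + 1) ll 1) [] sc) sc
  if sc ≤ 10 ^ 9 then sc else 10 ^ 9

-- ===== PORT B =====
def count_distinct_slices_alt (nums : List Int) (m : Int) : Int :=
  let n : Int := PySem.List.len nums
  let st := (PySem.List.pyRange (n - 1) (-1) (-1)).foldl
    (fun st i =>
      let run := min (st.2.2 + 1) (PySem.Dict.getD st.1 (PySem.List.pyGetD nums i 0) n - i)
      let total := st.2.1 + run
      (PySem.Dict.insert st.1 (PySem.List.pyGetD nums i 0) i, total, run))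
    ((PySem.Dict.empty : PySem.Dict Int Int), (0 : Int), (0 : Int))
  if st.2.1 ≤ 10 ^ 9 then st.2.1 else 10 ^ 9

-- ===== PRECONDITION & SPEC =====
def Spec_count_distinct_slices (nums : List Int) (m : Int) (out : Int) : Prop := out = count_distinct_slices_alt nums m
instance (nums : List Int) (m : Int) (out : Int) : Decidable (Spec_count_distinct_slices nums m out) := by unfold Spec_count_distinct_slices; infer_instance

-- ===== CLAIM (what is proved, stated in full; the proofs are below) =====
def Claim_equal_count_distinct_slices : Prop := ∀ (nums : List Int) (m : Int), Dom_count_distinct_slices nums m → Spec_count_distinct_slices nums m (count_distinct_slices nums m)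

-- ===== LEMMAS AND PROOFS =====

-- length of the longest prefix of xs that is duplicate-free and disjoint from 'seen'
def dlen (seen : List Int) : List Int → Nat
  | [] => 0
  | y :: ys => if y ∈ seen then 0 else 1 + dlen (y :: seen) ys

-- sum, over all suffixes, of the longest distinct prefix length = the number of distinct slices
def totalSpec : List Int → Nat
  | [] => 0
  | x :: xs => dlen [] (x :: xs) + totalSpec xs

theorem dlen_congr (s t : List Int) (xs : List Int) (h : ∀ y, y ∈ s ↔ y ∈ t) :
    dlen s xs = dlen t xs := by
  induction xs generalizing s t with
  | nil => rfl
  | cons y ys ih =>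
    simp only [dlen]
    by_cases hy : y ∈ s
    · simp [hy, (h y).mp hy]
    · have hy' : y ∉ t := fun hc => hy ((h y).mpr hc)
      simp only [hy, hy']
      exact congrArg (1 + ·) (ih _ _ (by intro z; simp [h z]))

theorem dlen_le_length (s : List Int) (xs : List Int) : dlen s xs ≤ xs.length := by
  induction xs generalizing s with
  | nil => simp [dlen]
  | cons y ys ih =>
    simp only [dlen, List.length_cons]
    split
    · omega
    · have := ih (y :: s); omega

theorem dlen_cons_seen (xs : List Int) (x : Int) (s : List Int) :
    dlen (x :: s) xs = min (dlen s xs) (xs.idxOf x) := by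
  induction xs generalizing s x with
  | nil => simp [dlen]
  | cons y ys ih =>
    by_cases hyx : y = x
    · subst hyx
      simp [dlen, List.idxOf_cons_self]
    · have hidx : (y :: ys).idxOf x = ys.idxOf x + 1 := by
        simp [hyx]
      by_cases hys : y ∈ s
      · simp [dlen, hys, hyx]
      · have h1 : dlen (y :: x :: s) ys = dlen (x :: y :: s) ys := by
          apply dlen_congr; intro z; constructor <;> (intro hz; simp at hz ⊢; tauto)
        simp only [dlen, List.mem_cons, hyx, hys, or_false, if_neg, not_false_iff, hidx]
        rw [h1, ih, ih]
        omega

-- A's inner loop counts the longest prefix of the remaining suffix that stays distinct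
theorem innerA_eq (nums : List Int) (i : Int) :
    ∀ (suf : List Int) (jn : Nat) (tmp : List Int) (sc : Int),
      jn ≤ nums.length → nums.drop jn = suf →
      innerA nums i (PySem.List.pyRange jn nums.length 1) tmp sc
        = sc + (dlen (PySem.List.pyGetD nums i 0 :: tmp) suf : Int) := by
  intro suf
  induction suf with
  | nil =>
    intro jn tmp sc hle hdrop
    have hjn : jn = nums.length := by
      have := List.length_drop (l := nums) (i := jn)
      rw [hdrop] at this; simp at this; omega
    subst hjn
    rw [PySem.List.pyRange_one_eq_nil (by omega)]
    simp [innerA, dlen]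
  | cons y ys ih =>
    intro jn tmp sc hle hdrop
    have hjn : jn < nums.length := by
      have := List.length_drop (l := nums) (i := jn)
      rw [hdrop] at this; simp at this; omega
    have hy : nums.getD jn 0 = y := by
      have h0 : nums[jn]? = some y := by
        rw [show nums[jn]? = (List.drop jn nums)[0]? by simp [List.getElem?_drop], hdrop]
        rfl
      simp [List.getD, h0]
    have hrange : PySem.List.pyRange (jn : Int) nums.length 1
        = (jn : Int) :: PySem.List.pyRange ((jn : Int) + 1) nums.length 1 := by
      exact PySem.List.pyRange_one_cons (by exact_mod_cast hjn)
    rw [hrange]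
    simp only [innerA]
    have hget : PySem.List.pyGetD nums (jn : Int) 0 = y := by
      rw [PySem.List.pyGetD_natCast]; exact hy
    rw [hget]
    set x := PySem.List.pyGetD nums i 0 with hx
    by_cases hmem : y ∈ x :: tmp
    · have : ¬ y ∉ tmp ++ [x] := by simp at hmem ⊢; tauto
      rw [if_neg this]
      simp [dlen, hmem]
    · have hnot : y ∉ tmp ++ [x] := by simp at hmem ⊢; tauto
      rw [if_pos hnot]
      have hcast : ((jn : Int) + 1) = ((jn + 1 : Nat) : Int) := by push_cast; ring
      rw [hcast, ih (jn + 1) (tmp ++ [x] ++ [y]) (sc + 1) (by omega)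
        (by rw [← List.drop_drop]; rw [hdrop]; simp)]
      have hc : dlen (x :: (tmp ++ [x] ++ [y])) ys = dlen (y :: x :: tmp) ys := by
        apply dlen_congr; intro z; constructor <;> (intro hz; simp at hz ⊢; tauto)
      rw [hc]
      simp only [dlen, hmem, if_neg, not_false_iff]
      omega

-- totalSpec as a sum over starting positions
theorem totalSpec_eq_sum (l : List Int) :
    totalSpec l = ((List.range l.length).map
      (fun k => 1 + dlen [l.getD k 0] (l.drop (k + 1)))).sum := by
  induction l with
  | nil => simp [totalSpec]
  | cons x xs ih =>
    rw [totalSpec, ih]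
    simp only [List.length_cons, List.range_succ_eq_map, List.map_cons, List.map_map,
      List.sum_cons]
    congr 1

theorem sum_map_one_add (f : Nat → Nat) (l : List Nat) :
    (l.map (fun k => 1 + f k)).sum = l.length + (l.map f).sum := by
  induction l with
  | nil => rfl
  | cons a l ih => simp [ih]; omega

theorem A_eq_totalSpec (nums : List Int) (m : Int) :
    count_distinct_slices nums m
      = if (totalSpec nums : Int) ≤ 10 ^ 9 then (totalSpec nums : Int) else 10 ^ 9 := by
  rcases List.eq_nil_or_concat' nums with h | ⟨l0, a, h⟩
  · subst h; rfl
  have hN : 1 ≤ nums.length := by subst h; simp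
  unfold count_distinct_slices
  simp only [PySem.List.len_eq]
  have hbody : (PySem.List.pyRange 0 ((nums.length : Int) - 1) 1).foldl
      (fun sc i => innerA nums i (PySem.List.pyRange (i + 1) (nums.length : Int) 1) [] sc)
      (0 + (nums.length : Int))
      = (PySem.List.pyRange 0 ((nums.length : Int) - 1) 1).foldl
      (fun sc i => sc + ((dlen [nums.getD i.toNat 0] (nums.drop (i.toNat + 1)) : Nat) : Int))
      (0 + (nums.length : Int)) := by
    apply PySem.List.foldl_congr_mem
    intro acc i hi
    rw [PySem.List.mem_pyRange_one] at hi
    have hi1 : (i + 1) = ((i.toNat + 1 : Nat) : Int) := by omega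
    have hjn : i.toNat + 1 ≤ nums.length := by omega
    rw [hi1, innerA_eq nums i (nums.drop (i.toNat + 1)) (i.toNat + 1) [] acc hjn rfl]
    have hpg : PySem.List.pyGetD nums i 0 = nums.getD i.toNat 0 := by
      rw [show (i : Int) = ((i.toNat : Nat) : Int) by omega, PySem.List.pyGetD_natCast]
      simp
      rw [show (max i 0).toNat = i.toNat by omega]
    simp [hpg]
  rw [hbody, PySem.List.foldl_add, PySem.List.pyRange_zero]
  have hlen : ((nums.length : Int) - 1).toNat = nums.length - 1 := by omega
  rw [hlen, List.map_map]
  have hsc : (0 + (nums.length : Int)) +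
      ((List.range (nums.length - 1)).map
        ((fun i => ((dlen [nums.getD i.toNat 0] (nums.drop (i.toNat + 1)) : Nat) : Int)) ∘ fun k : Nat => (k : Int))).sum
      = ((totalSpec nums : Nat) : Int) := by
    have hmap : ((List.range (nums.length - 1)).map
        ((fun i => ((dlen [nums.getD i.toNat 0] (nums.drop (i.toNat + 1)) : Nat) : Int)) ∘ fun k : Nat => (k : Int)))
        = ((List.range (nums.length - 1)).map
        (fun k => ((dlen [nums.getD k 0] (nums.drop (k + 1)) : Nat) : Int))) := by
      apply List.map_congr_left
      intro k hk
      simp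
    rw [hmap]
    have hnat : totalSpec nums = nums.length + ((List.range (nums.length - 1)).map
        (fun k => dlen [nums.getD k 0] (nums.drop (k + 1)))).sum := by
      rw [totalSpec_eq_sum]
      have : nums.length = (nums.length - 1) + 1 := by omega
      rw [this, List.range_succ]
      simp only [List.map_append, List.sum_append, List.map_cons, List.map_nil, List.sum_cons,
        List.sum_nil]
      have hzero : dlen [nums.getD (nums.length - 1) 0] (nums.drop (nums.length - 1 + 1)) = 0 := by
        have : nums.drop (nums.length - 1 + 1) = [] := by
          apply List.drop_eq_nil_of_le; omega
        rw [this]; rfl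
      rw [hzero, sum_map_one_add]
      simp [List.length_range]
      omega
    rw [hnat]
    push_cast
    rw [List.map_map]
    simp [Function.comp_def]
  rw [hsc]

def InvB (nums : List Int) (i : Nat) (st : PySem.Dict Int Int × Int × Int) : Prop :=
  (∀ v : Int, st.1.getD v (nums.length : Int)
      = if v ∈ nums.drop i then (i : Int) + ((nums.drop i).idxOf v : Int)
        else (nums.length : Int))
  ∧ st.2.1 = (totalSpec (nums.drop i) : Int)
  ∧ st.2.2 = (dlen [] (nums.drop i) : Int)

theorem stepB_inv (nums : List Int) (i : Nat) (st : PySem.Dict Int Int × Int × Int)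
    (hi : i < nums.length) (h : InvB nums (i + 1) st) :
    InvB nums i
      (let run := min (st.2.2 + 1)
        (PySem.Dict.getD st.1 (PySem.List.pyGetD nums (i : Int) 0) (nums.length : Int) - (i : Int))
       let total := st.2.1 + run
       (st.1.insert (PySem.List.pyGetD nums (i : Int) 0) (i : Int), total, run)) := by
  obtain ⟨hd, ht, hr⟩ := h
  have hx : PySem.List.pyGetD nums (i : Int) 0 = nums[i] := by
    rw [PySem.List.pyGetD_natCast]
    exact List.getD_eq_getElem nums 0 hi
  have hdrop : nums.drop i = nums[i] :: nums.drop (i + 1) := (List.getElem_cons_drop hi).symm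
  have hdlen : dlen [] (nums.drop i)
      = 1 + min (dlen [] (nums.drop (i + 1))) ((nums.drop (i + 1)).idxOf nums[i]) := by
    rw [hdrop]
    show (if nums[i] ∈ ([] : List Int) then 0 else 1 + dlen [nums[i]] (nums.drop (i+1)))
      = _
    rw [if_neg (List.not_mem_nil), dlen_cons_seen]
  have hrun : min (st.2.2 + 1)
      (PySem.Dict.getD st.1 (PySem.List.pyGetD nums (i : Int) 0) (nums.length : Int) - (i : Int))
      = (dlen [] (nums.drop i) : Int) := by
    rw [hx, hd nums[i], hdlen]
    have hlen1 : (nums.drop (i + 1)).length = nums.length - (i + 1) := by simp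
    have hle := dlen_le_length [] (nums.drop (i + 1))
    by_cases hm : nums[i] ∈ nums.drop (i + 1)
    · rw [if_pos hm]
      have hidx : (nums.drop (i + 1)).idxOf nums[i] < (nums.drop (i + 1)).length :=
        List.idxOf_lt_length_of_mem hm
      simp only [min_def]
      split_ifs <;> push_cast <;> omega
    · rw [if_neg hm]
      have hidx : (nums.drop (i + 1)).idxOf nums[i] = (nums.drop (i + 1)).length :=
        List.idxOf_eq_length_iff.mpr hm
      simp only [min_def]
      split_ifs <;> push_cast <;> omega
  refine ⟨?_, ?_, ?_⟩
  · intro v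
    rw [hx, PySem.Dict.getD_insert, hdrop]
    by_cases hv : v = nums[i]
    · subst hv
      rw [if_pos rfl, if_pos List.mem_cons_self, List.idxOf_cons_self]
      simp
    · rw [if_neg hv, hd v]
      by_cases hm : v ∈ nums.drop (i + 1)
      · rw [if_pos hm, if_pos (List.mem_cons_of_mem _ hm),
          List.idxOf_cons_ne _ (fun hc => hv hc.symm)]
        push_cast
        ring
      · rw [if_neg hm, if_neg (fun hc => (List.mem_cons.mp hc).elim hv hm)]
  · show st.2.1 + _ = _
    rw [hrun, ht, hdrop]
    show _ = ((dlen [] (nums[i] :: nums.drop (i+1)) + totalSpec (nums.drop (i+1)) : Nat) : Int)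
    rw [← hdrop]
    push_cast
    ring
  · exact hrun

theorem foldB_inv (nums : List Int) :
    ∀ (i : Nat) (st : PySem.Dict Int Int × Int × Int), i ≤ nums.length → InvB nums i st →
      InvB nums 0 ((PySem.List.pyRange ((i : Int) - 1) (-1) (-1)).foldl
        (fun st j =>
          let run := min (st.2.2 + 1)
            (PySem.Dict.getD st.1 (PySem.List.pyGetD nums j 0) (nums.length : Int) - j)
          let total := st.2.1 + run
          (st.1.insert (PySem.List.pyGetD nums j 0) j, total, run)) st) := by
  intro i
  induction i with
  | zero =>
    intro st _ h
    rw [PySem.List.pyRange_neg_one_eq_nil (by omega)]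
    exact h
  | succ i ih =>
    intro st hle h
    have : ((i + 1 : Nat) : Int) - 1 = (i : Int) := by push_cast; ring
    rw [this, PySem.List.pyRange_neg_one_cons (by omega), List.foldl_cons]
    exact ih _ (by omega) (stepB_inv nums i st (by omega) h)

theorem B_eq_totalSpec (nums : List Int) (m : Int) :
    count_distinct_slices_alt nums m
      = if (totalSpec nums : Int) ≤ 10 ^ 9 then (totalSpec nums : Int) else 10 ^ 9 := by
  unfold count_distinct_slices_alt
  simp only [PySem.List.len_eq]
  have hinit : InvB nums nums.length ((PySem.Dict.empty : PySem.Dict Int Int), 0, 0) := by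
    refine ⟨?_, ?_, ?_⟩ <;> simp [PySem.Dict.getD_empty, List.drop_length, totalSpec, dlen]
  have h := foldB_inv nums nums.length _ le_rfl hinit
  obtain ⟨-, ht, -⟩ := h
  simp only [List.drop_zero] at ht
  rw [ht]

-- ===== VERDICT (by name: the statement is the Claim_ definition above) =====
theorem count_distinct_slices_spec : Claim_equal_count_distinct_slices := by
  intro nums m _
  unfold Spec_count_distinct_slices
  rw [A_eq_totalSpec, B_eq_totalSpec]
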